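-- pv_equiv track=rewrite | github.com/snehasrinivas07/diagnostic-ai | diagnostic_app.py | progress_bar_html
-- ===== SOURCE A (Python) =====
-- def progress_bar_html(idx, total):
--     dots = []
--     for i in range(total):
--         if i < idx:
--             dots.append('<span style="display:inline-block;width:10px;height:10px;border-radius:50%;background:#3B6D11;margin:0 3px"></span>')
--         elif i == idx:
--             dots.append('<span style="display:inline-block;width:24px;height:10px;border-radius:5px;background:#378ADD;margin:0 3px"></span>')
--         else:
--             dots.append('<span style="display:inline-block;width:10px;height:10px;border-radius:50%;background:#d0cfd8;margin:0 3px"></span>')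
--     return "".join(dots) + f'<span style="font-size:0.78rem;color:#888;margin-left:8px">Zone {idx+1} of {total}</span>'
-- ===== SOURCE B (Python) =====
-- GREEN = '<span style="display:inline-block;width:10px;height:10px;border-radius:50%;background:#3B6D11;margin:0 3px"></span>'
-- BLUE = '<span style="display:inline-block;width:24px;height:10px;border-radius:5px;background:#378ADD;margin:0 3px"></span>'
-- GREY = '<span style="display:inline-block;width:10px;height:10px;border-radius:50%;background:#d0cfd8;margin:0 3px"></span>'
--
--
-- def progress_bar_html(idx, total):
--     before = max(0, min(idx, total))
--     current = 0 <= idx < total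
--     after = total - before - (1 if current else 0)
--     bar = GREEN * before + (BLUE if current else '') + GREY * after
--     return bar + f'<span style="font-size:0.78rem;color:#888;margin-left:8px">Zone {idx+1} of {total}</span>'
-- ===== Notes on version B (the rewrite author's own statement) =====
-- stated objective: simpler
-- what changed: Replaces the per-index range loop with three closed-form counts (clamped green prefix, presence of the blue dot, grey remainder) and string repetition.
import Mathlib
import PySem

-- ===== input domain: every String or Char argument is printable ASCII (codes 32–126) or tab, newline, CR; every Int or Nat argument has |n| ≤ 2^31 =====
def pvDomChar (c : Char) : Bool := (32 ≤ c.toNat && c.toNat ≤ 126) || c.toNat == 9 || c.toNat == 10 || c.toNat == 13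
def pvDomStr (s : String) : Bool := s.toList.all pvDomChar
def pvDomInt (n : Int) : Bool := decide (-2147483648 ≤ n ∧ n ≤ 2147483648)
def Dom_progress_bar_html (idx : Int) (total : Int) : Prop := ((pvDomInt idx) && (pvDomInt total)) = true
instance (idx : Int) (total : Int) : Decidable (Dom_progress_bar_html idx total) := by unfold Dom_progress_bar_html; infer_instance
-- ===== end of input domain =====

-- B replaces A's per-index loop by three closed-form counts (green prefix, optional blue dot, grey rest) and string repetition (objective: simpler).

-- shared string literals (the three dot spans and the footer builder)
def pvGreen : String := "<span style=\"display:inline-block;width:10px;height:10px;border-radius:50%;background:#3B6D11;margin:0 3px\"></span>"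
def pvBlue : String := "<span style=\"display:inline-block;width:24px;height:10px;border-radius:5px;background:#378ADD;margin:0 3px\"></span>"
def pvGrey : String := "<span style=\"display:inline-block;width:10px;height:10px;border-radius:50%;background:#d0cfd8;margin:0 3px\"></span>"
def pvFooter (idx total : Int) : String :=
  "<span style=\"font-size:0.78rem;color:#888;margin-left:8px\">Zone " ++ PySem.Int.toStr (idx + 1) ++ " of " ++ PySem.Int.toStr total ++ "</span>"

-- ===== PORT A =====
def progress_bar_html (idx : Int) (total : Int) : String :=
  let dots : List String :=
    (PySem.List.pyRange 0 total 1).foldl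
      (fun acc i =>
        if i < idx then acc ++ [pvGreen]
        else if i = idx then acc ++ [pvBlue]
        else acc ++ [pvGrey]) []
  PySem.Str.join "" dots ++ pvFooter idx total

-- ===== PORT B =====
-- Python's  s * n  on strings (n ≤ 0 gives ""): exact hand port
def pvRepeat (s : String) : Nat → String
  | 0 => ""
  | n + 1 => pvRepeat s n ++ s
def pvStrMul (s : String) (n : Int) : String := pvRepeat s n.toNat

def progress_bar_html_alt (idx : Int) (total : Int) : String :=
  let before : Int := max 0 (min idx total)
  let current : Bool := decide (0 ≤ idx ∧ idx < total)
  let after : Int := total - before - (if current then 1 else 0)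
  let bar : String := pvStrMul pvGreen before ++ (if current then pvBlue else "") ++ pvStrMul pvGrey after
  bar ++ pvFooter idx total

-- ===== PRECONDITION & SPEC =====
def Spec_progress_bar_html (idx : Int) (total : Int) (out : String) : Prop := out = progress_bar_html_alt idx total
instance (idx : Int) (total : Int) (out : String) : Decidable (Spec_progress_bar_html idx total out) := by unfold Spec_progress_bar_html; infer_instance

-- ===== CLAIM (what is proved, stated in full; the proofs are below) =====
def Claim_equal_progress_bar_html : Prop := ∀ (idx : Int) (total : Int), Dom_progress_bar_html idx total → Spec_progress_bar_html idx total (progress_bar_html idx total)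

-- ===== LEMMAS AND PROOFS =====

-- the dot A appends for index i
def pvDot (idx i : Int) : String :=
  if i < idx then pvGreen else if i = idx then pvBlue else pvGrey

theorem pv_join_append (l : List String) (x : String) :
    PySem.Str.join "" (l ++ [x]) = PySem.Str.join "" l ++ x := by
  rw [← String.toList_inj]
  have hic : ∀ (a b : List Char) (u : List (List Char)),
      List.intersperse ([] : List Char) (a :: b :: u) = a :: [] :: List.intersperse [] (b :: u) :=
    fun _ _ _ => rfl
  induction l with
  | nil => simp [PySem.Str.join, PySem.Chars.join, List.intercalate]
  | cons a t ih =>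
      cases t with
      | nil => simp [PySem.Str.join, PySem.Chars.join, List.intercalate]
      | cons b u =>
          simp only [PySem.Str.join, PySem.Chars.join, List.intercalate, List.map_append,
            List.map_cons, String.toList_ofList, String.toList_append, List.map_nil,
            List.cons_append, String.toList_empty] at *
          rw [hic a.toList b.toList (List.map String.toList u ++ [x.toList]),
              hic a.toList b.toList (List.map String.toList u)]
          simp only [List.flatten_cons, List.nil_append, List.append_assoc]
          rw [ih]

theorem pvStrMul_succ (s : String) (k : Int) (h : 0 ≤ k) : pvStrMul s (k + 1) = pvStrMul s k ++ s := by
  unfold pvStrMul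
  have hk : (k + 1).toNat = k.toNat + 1 := by omega
  rw [hk]
  rfl

theorem pvStrMul_nonpos (s : String) (k : Int) (h : k ≤ 0) : pvStrMul s k = "" := by
  unfold pvStrMul
  have hk : k.toNat = 0 := by omega
  rw [hk]
  rfl

-- A's joined dot row equals B's three repeated blocks, for total = n ≥ 0
theorem pv_core (idx : Int) (n : Nat) :
    PySem.Str.join "" (((PySem.List.pyRange 0 (n : Int) 1).map (pvDot idx))) =
      pvStrMul pvGreen (max 0 (min idx (n : Int))) ++
        (if decide (0 ≤ idx ∧ idx < (n : Int)) then pvBlue else "") ++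
        pvStrMul pvGrey ((n : Int) - max 0 (min idx (n : Int)) - (if decide (0 ≤ idx ∧ idx < (n : Int)) then 1 else 0)) := by
  induction n with
  | zero =>
      rw [Nat.cast_zero, PySem.List.pyRange_one_eq_nil le_rfl]
      have hc : decide (0 ≤ idx ∧ idx < (0 : Int)) = false := by
        simp only [decide_eq_false_iff_not]; omega
      rw [hc, pvStrMul_nonpos _ _ (by omega)]
      simp only [Bool.false_eq_true, if_false]
      rw [pvStrMul_nonpos _ _ (by omega)]
      rfl
  | succ n ih =>
      have h0 : (0 : Int) ≤ (n : Int) := by omega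
      rw [Nat.cast_succ, PySem.List.pyRange_one_succ_right h0, List.map_append, List.map_singleton,
        pv_join_append, ih]
      rcases lt_trichotomy ((n : Int)) idx with h | h | h
      · have hdot : pvDot idx (n : Int) = pvGreen := by unfold pvDot; rw [if_pos h]
        have hb1 : max 0 (min idx (n : Int)) = (n : Int) := by omega
        have hb2 : max 0 (min idx ((n : Int) + 1)) = (n : Int) + 1 := by omega
        have hc1 : decide (0 ≤ idx ∧ idx < (n : Int)) = false := by
          simp only [decide_eq_false_iff_not]; omega
        have hc2 : decide (0 ≤ idx ∧ idx < (n : Int) + 1) = false := by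
          simp only [decide_eq_false_iff_not]; omega
        rw [hdot, hb1, hb2, hc1, hc2]
        simp only [Bool.false_eq_true, if_false]
        rw [pvStrMul_succ _ _ h0, pvStrMul_nonpos pvGrey _ (by omega),
          pvStrMul_nonpos pvGrey _ (by omega)]
        simp
      · have hdot : pvDot idx (n : Int) = pvBlue := by
          unfold pvDot; rw [if_neg (by omega), if_pos h]
        have hb1 : max 0 (min idx (n : Int)) = (n : Int) := by omega
        have hb2 : max 0 (min idx ((n : Int) + 1)) = (n : Int) := by omega
        have hc1 : decide (0 ≤ idx ∧ idx < (n : Int)) = false := by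
          simp only [decide_eq_false_iff_not]; omega
        have hc2 : decide (0 ≤ idx ∧ idx < (n : Int) + 1) = true := by
          simp only [decide_eq_true_eq]; omega
        rw [hdot, hb1, hb2, hc1, hc2]
        simp only [Bool.false_eq_true, if_false, if_true]
        rw [pvStrMul_nonpos pvGrey _ (by omega), pvStrMul_nonpos pvGrey _ (by omega)]
        simp
      · have hdot : pvDot idx (n : Int) = pvGrey := by
          unfold pvDot; rw [if_neg (by omega), if_neg (by omega)]
        by_cases hpos : 0 ≤ idx
        · have hb1 : max 0 (min idx (n : Int)) = idx := by omega
          have hb2 : max 0 (min idx ((n : Int) + 1)) = idx := by omega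
          have hc1 : decide (0 ≤ idx ∧ idx < (n : Int)) = true := by
            simp only [decide_eq_true_eq]; omega
          have hc2 : decide (0 ≤ idx ∧ idx < (n : Int) + 1) = true := by
            simp only [decide_eq_true_eq]; omega
          rw [hdot, hb1, hb2, hc1, hc2]
          simp only [if_true]
          rw [show ((n : Int) + 1 - idx - 1) = ((n : Int) - idx - 1) + 1 by ring,
            pvStrMul_succ _ _ (by omega)]
          simp [String.append_assoc]
        · have hb1 : max 0 (min idx (n : Int)) = 0 := by omega
          have hb2 : max 0 (min idx ((n : Int) + 1)) = 0 := by omega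
          have hc1 : decide (0 ≤ idx ∧ idx < (n : Int)) = false := by
            simp only [decide_eq_false_iff_not]; omega
          have hc2 : decide (0 ≤ idx ∧ idx < (n : Int) + 1) = false := by
            simp only [decide_eq_false_iff_not]; omega
          rw [hdot, hb1, hb2, hc1, hc2]
          simp only [Bool.false_eq_true, if_false]
          rw [show ((n : Int) + 1 - 0 - 0) = ((n : Int) - 0 - 0) + 1 by ring,
            pvStrMul_succ _ _ (by omega)]
          simp [String.append_assoc]

-- A's three-branch append loop is the map of pvDot
theorem pv_fold_eq_map (idx : Int) (l : List Int) (acc : List String) :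
    l.foldl
      (fun acc i =>
        if i < idx then acc ++ [pvGreen]
        else if i = idx then acc ++ [pvBlue]
        else acc ++ [pvGrey]) acc = acc ++ l.map (pvDot idx) := by
  have hf : (fun (acc : List String) (i : Int) =>
      if i < idx then acc ++ [pvGreen]
      else if i = idx then acc ++ [pvBlue]
      else acc ++ [pvGrey]) = fun acc i => acc ++ [pvDot idx i] := by
    funext acc i
    unfold pvDot
    split_ifs <;> rfl
  rw [hf, PySem.List.foldl_append_singleton_eq_map]

-- ===== VERDICT (by name: the statement is the Claim_ definition above) =====
theorem progress_bar_html_spec : Claim_equal_progress_bar_html := by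
  intro idx total _
  unfold Spec_progress_bar_html progress_bar_html progress_bar_html_alt
  simp only [pv_fold_eq_map, List.nil_append]
  by_cases hle : total ≤ 0
  · rw [PySem.List.pyRange_one_eq_nil hle]
    have hc : decide (0 ≤ idx ∧ idx < total) = false := by
      simp only [decide_eq_false_iff_not]; omega
    rw [hc]
    simp only [Bool.false_eq_true, if_false]
    rw [pvStrMul_nonpos _ _ (by omega), pvStrMul_nonpos _ _ (by omega)]
    simp [PySem.Str.join, PySem.Chars.join, List.intercalate]
  · have hn : ((total.toNat : Nat) : Int) = total := Int.toNat_of_nonneg (by omega)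
    rw [← hn]
    rw [pv_core idx total.toNat]
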